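-- pv_equiv track=rewrite | github.com/neungkl/nsa-encryption-breaker | decryption.py | find_best_key
-- ===== SOURCE A (Python) =====
-- def find_best_key(factor, lower_key, upper_key, hash) :
--
--     prop_key = 1
--     for n in range(0, len(factor)) :
--
--         prop_key = 1
--         for i in range(n, len(factor)) :
--             if prop_key * factor[i] >= lower_key :
--                 break
--             prop_key *= factor[i]
--
--         i = 1
--         while prop_key * i < lower_key :
--             i = i + 1
--         prop_key = prop_key * i
--
--         if prop_key < lower_key or upper_key < prop_key :
--             continue
--
--         if hash % prop_key != 0 :
--             continue
--
--         break
--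
--     return prop_key
-- ===== SOURCE B (Python) =====
-- def _stopped_product(fs, lower_key):
--     p = 1
--     for f in fs:
--         if p * f >= lower_key:
--             break
--         p *= f
--     return p
--
-- def find_best_key(factor, lower_key, upper_key, hash):
--     prop_key = 1
--     for n in range(len(factor)):
--         p = _stopped_product(factor[n:], lower_key)
--         # smallest multiplier i >= 1 with p*i >= lower_key, by ceiling division
--         prop_key = p * max(1, -(-lower_key // p))
--         if lower_key <= prop_key <= upper_key and hash % prop_key == 0:
--             return prop_key
--     return prop_key
-- ===== Notes on version B (the rewrite author's own statement) =====
-- stated objective: alternative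
-- what changed: B replaces A's linear while-loop search for the smallest multiplier i with prop_key*i >= lower_key by one ceiling division, and folds the two continue-guards into one combined condition with an early return.
-- outside the precondition, e.g. on find_best_key([-2], -5, 10, 0): A returns 1, B returns 1
import Mathlib
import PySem

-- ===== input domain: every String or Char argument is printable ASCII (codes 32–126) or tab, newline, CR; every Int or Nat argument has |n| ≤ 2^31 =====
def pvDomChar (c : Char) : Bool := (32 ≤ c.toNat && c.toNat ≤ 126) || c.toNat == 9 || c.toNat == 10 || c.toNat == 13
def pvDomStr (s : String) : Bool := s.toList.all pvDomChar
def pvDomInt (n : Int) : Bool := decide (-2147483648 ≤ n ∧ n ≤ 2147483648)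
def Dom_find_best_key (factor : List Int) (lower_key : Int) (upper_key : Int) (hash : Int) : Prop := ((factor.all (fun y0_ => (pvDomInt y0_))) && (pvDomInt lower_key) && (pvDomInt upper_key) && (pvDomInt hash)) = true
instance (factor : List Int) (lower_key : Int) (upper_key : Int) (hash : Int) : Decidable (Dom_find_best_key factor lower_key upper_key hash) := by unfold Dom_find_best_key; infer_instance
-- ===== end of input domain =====

-- B replaces A's linear while-loop multiplier search by one ceiling division (intended as faster; a timing run could not confirm a clean reading, so no speed is claimed).

-- ===== PORT A =====
-- A's inner 'for i in range(n, len(factor))' loop building prop_key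
def pvAStop (lower : Int) : Int → List Int → Int
  | prop, [] => prop
  | prop, f :: rest => if prop * f ≥ lower then prop else pvAStop lower (prop * f) rest

-- A's 'while prop_key * i < lower_key: i = i + 1' (fuel makes the same computation total;
-- the fuel is sufficient on every input Pre_ admits)
def pvAWhile (prop lower : Int) : Int → Nat → Int
  | i, 0 => i
  | i, fuel+1 => if prop * i < lower then pvAWhile prop lower (i+1) fuel else i

def pvALoop (factor : List Int) (lower upper hash : Int) : Int → List Nat → Int
  | prop, [] => prop
  | _, n :: ns =>
    let p := pvAStop lower 1 (factor.drop n)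
    let p2 := p * pvAWhile p lower 1 (lower.toNat + 1)
    if p2 < lower ∨ upper < p2 then pvALoop factor lower upper hash p2 ns
    else if PySem.Int.mod hash p2 ≠ 0 then pvALoop factor lower upper hash p2 ns
    else p2

def find_best_key (factor : List Int) (lower_key : Int) (upper_key : Int) (hash : Int) : Int :=
  pvALoop factor lower_key upper_key hash 1 (List.range factor.length)

-- ===== PORT B =====
-- Source B's _stopped_product
def pvBStop (lower : Int) : Int → List Int → Int
  | p, [] => p
  | p, f :: rest => if p * f ≥ lower then p else pvBStop lower (p * f) rest

def pvBLoop (factor : List Int) (lower upper hash : Int) : Int → List Nat → Int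
  | prop, [] => prop
  | _, n :: ns =>
    let p := pvBStop lower 1 (factor.drop n)
    let prop2 := p * max 1 (-(PySem.Int.floordiv (-lower) p))
    if lower ≤ prop2 ∧ prop2 ≤ upper ∧ PySem.Int.mod hash prop2 = 0 then prop2
    else pvBLoop factor lower upper hash prop2 ns

def find_best_key_alt (factor : List Int) (lower_key : Int) (upper_key : Int) (hash : Int) : Int :=
  pvBLoop factor lower_key upper_key hash 1 (List.range factor.length)

-- ===== PRECONDITION & SPEC =====
-- Pre_ excludes lists containing a nonpositive factor: there A's while loop diverges whenever a
-- stage product becomes nonpositive, and the set of such inputs on which A still terminates is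
-- not a closed-form condition (where A does terminate, B returns the same value).
def Pre_find_best_key (factor : List Int) (lower_key : Int) (upper_key : Int) (hash : Int) : Prop :=
  ∀ x ∈ factor, 0 < x
instance (factor : List Int) (lower_key : Int) (upper_key : Int) (hash : Int) : Decidable (Pre_find_best_key factor lower_key upper_key hash) := by unfold Pre_find_best_key; infer_instance

def pvWitness_find_best_key : List Int × Int × Int × Int := ([2, 3], 5, 100, 30)

def Spec_find_best_key (factor : List Int) (lower_key : Int) (upper_key : Int) (hash : Int) (out : Int) : Prop := out = find_best_key_alt factor lower_key upper_key hash
instance (factor : List Int) (lower_key : Int) (upper_key : Int) (hash : Int) (out : Int) : Decidable (Spec_find_best_key factor lower_key upper_key hash out) := by unfold Spec_find_best_key; infer_instance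

-- ===== CLAIM (what is proved, stated in full; the proofs are below) =====
def Claim_equal_find_best_key : Prop := ∀ (factor : List Int) (lower_key : Int) (upper_key : Int) (hash : Int), Dom_find_best_key factor lower_key upper_key hash → Pre_find_best_key factor lower_key upper_key hash → Spec_find_best_key factor lower_key upper_key hash (find_best_key factor lower_key upper_key hash)

-- ===== LEMMAS AND PROOFS =====

theorem stop_eq (lower p : Int) (fs : List Int) : pvAStop lower p fs = pvBStop lower p fs := by
  induction fs generalizing p with
  | nil => rfl
  | cons f rest ih => simp only [pvAStop, pvBStop]; split <;> simp [ih]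

theorem stop_pos (lower : Int) (fs : List Int) (p : Int) (hp : 0 < p)
    (hfs : ∀ x ∈ fs, 0 < x) : 0 < pvAStop lower p fs := by
  induction fs generalizing p with
  | nil => exact hp
  | cons f rest ih =>
    simp only [pvAStop]
    split
    · exact hp
    · exact ih _ (mul_pos hp (hfs f (by simp))) (fun x hx => hfs x (by simp [hx]))

-- B's multiplier t = max 1 ⌈lower/p⌉ is exactly the least i ≥ 1 with lower ≤ p*i
theorem target_spec (lower p : Int) (hp : 0 < p) :
    lower ≤ p * max 1 (-(PySem.Int.floordiv (-lower) p)) ∧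
    (1 < max 1 (-(PySem.Int.floordiv (-lower) p)) →
      p * (max 1 (-(PySem.Int.floordiv (-lower) p)) - 1) < lower) := by
  set c : Int := -(PySem.Int.floordiv (-lower) p) with hc
  have h1 : (c - 1) * p < lower ∧ lower ≤ c * p :=
    (PySem.Int.neg_floordiv_neg_eq_iff_of_pos hp).mp hc.symm
  rcases le_or_gt 1 c with h | h
  · rw [max_eq_right h]
    exact ⟨by linarith [h1.2, mul_comm c p], fun _ => by linarith [h1.1, mul_comm (c - 1) p]⟩
  · rw [max_eq_left (le_of_lt h)]
    have hle : c * p ≤ 1 * p := mul_le_mul_of_nonneg_right (by omega) (le_of_lt hp)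
    exact ⟨by linarith [h1.2], fun hcon => absurd hcon (by omega)⟩

-- A's while loop from i computes the target t, given i ≤ t and enough fuel
theorem while_eq_target (p lower : Int) (hp : 0 < p) (t : Int)
    (ht1 : lower ≤ p * t) (ht2 : 1 < t → p * (t - 1) < lower) :
    ∀ (fuel : Nat) (i : Int), 1 ≤ i → i ≤ t → t - i ≤ (fuel : Int) →
      pvAWhile p lower i fuel = t := by
  intro fuel
  induction fuel with
  | zero =>
    intro i _ hit hfuel
    have : i = t := by omega
    simp [pvAWhile, this]
  | succ fuel ih =>
    intro i hi1 hit hfuel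
    simp only [pvAWhile]
    split
    · rename_i hlt
      have hne : i ≠ t := by
        intro h; rw [h] at hlt; omega
      exact ih (i+1) (by omega) (by omega) (by omega)
    · rename_i hge
      push Not at hge
      by_contra hne
      have hile : i ≤ t - 1 := by omega
      have h2 := ht2 (by omega)
      have : p * i ≤ p * (t - 1) := mul_le_mul_of_nonneg_left hile (le_of_lt hp)
      omega

theorem loop_eq (factor : List Int) (lower upper hash : Int)
    (hf : ∀ x ∈ factor, 0 < x) :
    ∀ (ns : List Nat) (prop : Int),
      pvALoop factor lower upper hash prop ns = pvBLoop factor lower upper hash prop ns := by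
  intro ns
  induction ns with
  | nil => intro prop; rfl
  | cons n ns ih =>
    intro prop
    simp only [pvALoop, pvBLoop]
    have hdrop : ∀ x ∈ factor.drop n, 0 < x := fun x hx => hf x (List.mem_of_mem_drop hx)
    set p := pvAStop lower 1 (factor.drop n) with hpdef
    have hp : 0 < p := stop_pos lower _ 1 one_pos hdrop
    have hpB : pvBStop lower 1 (factor.drop n) = p := (stop_eq _ _ _).symm
    set t : Int := max 1 (-(PySem.Int.floordiv (-lower) p)) with htdef
    obtain ⟨ht1, ht2⟩ := target_spec lower p hp
    rw [← htdef] at ht1 ht2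
    have htge1 : 1 ≤ t := le_max_left _ _
    have hfuel : t - 1 ≤ ((lower.toNat + 1 : Nat) : Int) := by
      rcases lt_or_ge 1 t with h | h
      · have h2 := ht2 h
        have h3 : 1 * (t - 1) ≤ p * (t - 1) := mul_le_mul_of_nonneg_right hp (by omega)
        push_cast; omega
      · push_cast; omega
    have hw : pvAWhile p lower 1 (lower.toNat + 1) = t :=
      while_eq_target p lower hp t ht1 ht2 _ 1 le_rfl htge1 hfuel
    rw [hpB, hw]
    set p2 := p * t with hp2def
    by_cases hm : PySem.Int.mod hash p2 = 0 <;> by_cases hin : lower ≤ p2 ∧ p2 ≤ upper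
    · rw [if_neg (by omega), if_neg (fun h => h hm), if_pos ⟨hin.1, hin.2, hm⟩]
    · rw [if_pos (by omega), if_neg (fun h => hin ⟨h.1, h.2.1⟩)]; exact ih p2
    · rw [if_neg (by omega), if_pos hm, if_neg (fun h => hm h.2.2)]; exact ih p2
    · rw [if_pos (by omega), if_neg (fun h => hin ⟨h.1, h.2.1⟩)]; exact ih p2

-- ===== VERDICT (by name: the statement is the Claim_ definition above) =====
theorem find_best_key_spec : Claim_equal_find_best_key := by
  intro factor lower_key upper_key hash _ hpre
  show find_best_key factor lower_key upper_key hash = find_best_key_alt factor lower_key upper_key hash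
  unfold find_best_key find_best_key_alt
  exact loop_eq factor lower_key upper_key hash hpre _ 1
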